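-- pv_equiv track=rewrite | github.com/dawei0716/evil-hangman | evilHangman.py | updateWordsRemaining
-- ===== SOURCE A (Python) =====
-- from collections import Counter
--
-- def updateWordsRemaining(guess, wordsRemaining):
--     wordGroups = findWordGroups(guess, wordsRemaining)
--     groupToReturn = Counter(wordGroups).most_common(1) #returns a list of one tuple.
--     groupToReturn = (groupToReturn[0])[0]
--     words = list()
--     for word in wordsRemaining:
--         wordGroup = ""
--         for letter in word:
--             if(letter == guess):
--                 wordGroup += guess
--             else:
--                 wordGroup += "-"
--         if(wordGroup == groupToReturn):
--             words.append(word)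
--     return words
--
-- def findWordGroups(guess, wordsRemaining):
--     wordGroups = list()
--     for word in wordsRemaining:
--         progress = ""
--         for letter in word:
--             if(letter == guess):
--                 progress += guess
--             else:
--                 progress += "-"
--         wordGroups.append(progress)
--     return wordGroups
-- ===== SOURCE B (Python) =====
-- def updateWordsRemaining(guess, wordsRemaining):
--     groups = {}
--     for word in wordsRemaining:
--         pattern = "".join(guess if letter == guess else "-" for letter in word)
--         groups.setdefault(pattern, []).append(word)
--     best = max(groups, key=lambda p: len(groups[p]))
--     return groups[best]
-- ===== Notes on version B (the rewrite author's own statement) =====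
-- stated objective: simpler
-- what changed: One pass grouping words into an insertion-ordered dict pattern->list (so patterns are computed once and A's second filtering pass over wordsRemaining disappears), then return the list of the first key with the largest group.
import Mathlib
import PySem

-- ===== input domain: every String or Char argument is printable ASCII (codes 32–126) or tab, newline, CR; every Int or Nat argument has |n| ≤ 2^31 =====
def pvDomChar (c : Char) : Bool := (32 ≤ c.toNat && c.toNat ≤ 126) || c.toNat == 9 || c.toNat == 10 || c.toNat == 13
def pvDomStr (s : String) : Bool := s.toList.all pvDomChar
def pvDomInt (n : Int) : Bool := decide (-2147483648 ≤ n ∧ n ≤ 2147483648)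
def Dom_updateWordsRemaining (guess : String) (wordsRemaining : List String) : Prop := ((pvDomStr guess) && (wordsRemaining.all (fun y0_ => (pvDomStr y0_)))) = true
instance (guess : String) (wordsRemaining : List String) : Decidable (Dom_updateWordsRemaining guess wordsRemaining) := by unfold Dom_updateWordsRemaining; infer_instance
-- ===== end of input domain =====

-- B replaces A's three passes (pattern list, Counter, re-pattern + filter) by one grouping
-- pass into an insertion-ordered dict and a lookup of the first largest group (objective: simpler).

-- ===== PORT A =====
-- strings are ported through List Char (PYSEM convention); 'wordGroup += guess' / '+= "-"' is list append
def findWordGroups (guess : String) (wordsRemaining : List String) : List String :=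
  wordsRemaining.foldl (fun acc word =>
    acc ++ [String.mk (word.toList.foldl
      (fun progress letter => progress ++ (if String.mk [letter] = guess then guess.toList else ['-'])) [])]) []

-- Counter(wordGroups).most_common(1)[0][0]: CPython's nlargest(1) is max(items, key=count),
-- i.e. the FIRST item with maximal count = PySem.List.max? on the Counter's items.
def updateWordsRemaining (guess : String) (wordsRemaining : List String) : List String :=
  let wordGroups := findWordGroups guess wordsRemaining
  match PySem.List.max? (PySem.Dict.counter wordGroups).items (fun p => p.2) with
  | none => []   -- empty Counter: Python raises IndexError here; excluded by Pre_
  | some groupToReturn =>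
      wordsRemaining.foldl (fun words word =>
        let wordGroup := String.mk (word.toList.foldl
          (fun acc letter => acc ++ (if String.mk [letter] = guess then guess.toList else ['-'])) [])
        if wordGroup = groupToReturn.1 then words ++ [word] else words) []

-- ===== PORT B =====
-- ''.join of the per-letter pieces is concatenation = List.flatten on the char lists;
-- groups.setdefault(pattern, []).append(word) is Dict.modify pattern [] (· ++ [word]);
-- max(groups, key=...) is PySem.List.max? over the keys (first maximal key).
def updateWordsRemaining_alt (guess : String) (wordsRemaining : List String) : List String :=
  let groups : PySem.Dict String (List String) :=
    wordsRemaining.foldl (fun d word =>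
      let pattern := String.mk ((word.toList.map
        (fun letter => if String.mk [letter] = guess then guess.toList else ['-'])).flatten)
      d.modify pattern [] (· ++ [word])) PySem.Dict.empty
  match PySem.List.max? groups.keys (fun p => (groups.getD p []).length) with
  | none => []   -- empty dict: Python's max raises ValueError here; excluded by Pre_
  | some best => groups.getD best []

-- ===== PRECONDITION & SPEC =====
-- Pre_ excludes only the empty word list, on which A raises IndexError (and B raises ValueError).
def Pre_updateWordsRemaining (guess : String) (wordsRemaining : List String) : Prop := wordsRemaining ≠ []
instance (guess : String) (wordsRemaining : List String) : Decidable (Pre_updateWordsRemaining guess wordsRemaining) := by unfold Pre_updateWordsRemaining; infer_instance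
def pvWitness_updateWordsRemaining : String × List String := ("a", ["ab", "bb", "cab"])

def Spec_updateWordsRemaining (guess : String) (wordsRemaining : List String) (out : List String) : Prop := out = updateWordsRemaining_alt guess wordsRemaining
instance (guess : String) (wordsRemaining : List String) (out : List String) : Decidable (Spec_updateWordsRemaining guess wordsRemaining out) := by unfold Spec_updateWordsRemaining; infer_instance

-- ===== CLAIM (what is proved, stated in full; the proofs are below) =====
def Claim_equal_updateWordsRemaining : Prop := ∀ (guess : String) (wordsRemaining : List String), Dom_updateWordsRemaining guess wordsRemaining → Pre_updateWordsRemaining guess wordsRemaining → Spec_updateWordsRemaining guess wordsRemaining (updateWordsRemaining guess wordsRemaining)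

-- ===== LEMMAS AND PROOFS =====

-- the guess-pattern of a word, as both programs compute it (shared normal form for the proofs)
def pvChunk (guess : String) (letter : Char) : List Char :=
  if String.mk [letter] = guess then guess.toList else ['-']

def pvPat (guess : String) (word : String) : String :=
  String.mk ((word.toList.map (pvChunk guess)).flatten)

theorem pvPat_foldl (guess : String) (word : String) :
    String.mk (word.toList.foldl
      (fun acc letter => acc ++ (if String.mk [letter] = guess then guess.toList else ['-'])) [])
      = pvPat guess word := by
  simp only [PySem.List.foldl_append_eq_flatMap, List.nil_append, List.flatMap_def]
  rfl

theorem findWordGroups_eq_map (guess : String) (ws : List String) :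
    findWordGroups guess ws = ws.map (pvPat guess) := by
  simp only [findWordGroups, PySem.List.foldl_append_singleton_eq_map, List.nil_append]
  exact List.map_congr_left (fun w _ => pvPat_foldl guess w)

-- B's grouping loop, named for the proofs
def pvGroups (guess : String) (ws : List String) : PySem.Dict String (List String) :=
  ws.foldl (fun d word => d.modify (pvPat guess word) [] (· ++ [word])) PySem.Dict.empty

theorem alt_eq_pvGroups (guess : String) (ws : List String) :
    updateWordsRemaining_alt guess ws =
      match PySem.List.max? (pvGroups guess ws).keys (fun p => ((pvGroups guess ws).getD p []).length) with
      | none => []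
      | some best => (pvGroups guess ws).getD best [] := by
  rfl

theorem pvGroups_getD (guess : String) (ws : List String) (k : String) :
    (pvGroups guess ws).getD k [] = ws.filter (fun w => pvPat guess w == k) := by
  have h : pvGroups guess ws =
      (ws.map (fun w => (pvPat guess w, w))).foldl
        (fun d p => d.modify p.1 [] (· ++ [p.2])) PySem.Dict.empty := by
    simp [pvGroups, List.foldl_map]
  rw [h, PySem.Dict.getD_foldl_modify_append]
  simp [List.filter_map, Function.comp_def, List.map_map]

theorem pvGroups_keys (guess : String) (ws : List String) :
    (pvGroups guess ws).keys = PySem.Set.ofList (ws.map (pvPat guess)) := by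
  rw [pvGroups, PySem.Dict.keys_foldl_modify_key]
  simp [PySem.Set.ofList_eq_foldl, PySem.Set.update, PySem.Dict.keys_empty]

theorem pvGroups_len (guess : String) (ws : List String) (k : String) :
    ((pvGroups guess ws).getD k []).length = (ws.map (pvPat guess)).count k := by
  rw [pvGroups_getD, List.count_eq_countP, List.countP_eq_length_filter, List.filter_map]
  simp [Function.comp_def]

-- max? commutes with map (first-maximum semantics)
theorem pv_max?_map {α β κ : Type} [LT κ] [DecidableLT κ] (l : List α) (f : α → β) (key : β → κ) :
    PySem.List.max? (l.map f) key = (PySem.List.max? l (fun x => key (f x))).map f := by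
  unfold PySem.List.max?
  rw [List.foldl_map]
  suffices h : ∀ (acc : Option α),
      l.foldl (fun acc x => match acc with
        | none => some (f x)
        | some m => if key m < key (f x) then some (f x) else some m) (acc.map f)
      = (l.foldl (fun acc x => match acc with
        | none => some x
        | some m => if key (f m) < key (f x) then some x else some m) acc).map f by
    simpa using h none
  intro acc
  induction l generalizing acc with
  | nil => rfl
  | cons x t ih =>
      cases acc with
      | none => simpa using ih (some x)
      | some m =>
          simp only [List.foldl_cons, Option.map_some]
          by_cases h : key (f m) < key (f x)
          · simpa [h] using ih (some x)
          · simpa [h] using ih (some m)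

-- max? only looks at the strict order of the keys
theorem pv_max?_congr {α κ₁ κ₂ : Type} [LT κ₁] [DecidableLT κ₁] [LT κ₂] [DecidableLT κ₂]
    (l : List α) (k₁ : α → κ₁) (k₂ : α → κ₂)
    (h : ∀ a b, k₁ a < k₁ b ↔ k₂ a < k₂ b) :
    PySem.List.max? l k₁ = PySem.List.max? l k₂ := by
  unfold PySem.List.max?
  suffices hs : ∀ (acc : Option α),
      l.foldl (fun acc x => match acc with
        | none => some x
        | some m => if k₁ m < k₁ x then some x else some m) acc
      = l.foldl (fun acc x => match acc with
        | none => some x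
        | some m => if k₂ m < k₂ x then some x else some m) acc from hs none
  intro acc
  induction l generalizing acc with
  | nil => rfl
  | cons x t ih =>
      cases acc with
      | none => simpa using ih (some x)
      | some m =>
          simp only [List.foldl_cons]
          by_cases hc : k₁ m < k₁ x
          · rw [if_pos hc, if_pos ((h m x).mp hc)]
            exact ih (some x)
          · rw [if_neg hc, if_neg (fun hc2 => hc ((h m x).mpr hc2))]
            exact ih (some m)

-- ===== VERDICT (by name: the statement is the Claim_ definition above) =====
theorem updateWordsRemaining_spec : Claim_equal_updateWordsRemaining := by
  intro guess ws _ _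
  unfold Spec_updateWordsRemaining
  rw [alt_eq_pvGroups]
  have hmax :
      PySem.List.max? (PySem.Dict.counter (findWordGroups guess ws)).items (fun p => p.2)
        = (PySem.List.max? (pvGroups guess ws).keys
            (fun p => ((pvGroups guess ws).getD p []).length)).map
            (fun k => (k, ((ws.map (pvPat guess)).count k : Int))) := by
    rw [findWordGroups_eq_map, PySem.Dict.items_counter, ← pvGroups_keys, pv_max?_map]
    congr 1
    apply pv_max?_congr
    intro a b
    simp [pvGroups_len]
  simp only [updateWordsRemaining]
  rw [hmax]
  cases hc : PySem.List.max? (pvGroups guess ws).keys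
      (fun p => ((pvGroups guess ws).getD p []).length) with
  | none => rfl
  | some best =>
      simp only [Option.map_some]
      rw [pvGroups_getD]
      rw [PySem.List.foldl_append_ite_eq_filter]
      simp only [List.nil_append]
      refine List.filter_congr (fun w _ => ?_)
      rw [pvPat_foldl]
      exact Eq.symm (Bool.beq_eq_decide_eq _ _)
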